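-- pv_equiv track=rewrite | github.com/Greenun/algorithmPractice | coalgo/bin_transform.py | rm_zero
-- ===== SOURCE A (Python) =====
-- def rm_zero(target):
--     count = 0
--     new_c = ""
--     for c in target:
--         if c == '0':
--             count += 1
--         else:
--             new_c += c
--     return count, new_c
-- ===== SOURCE B (Python) =====
-- def rm_zero(target):
--     return target.count('0'), target.replace('0', '')
-- ===== Notes on version B (the rewrite author's own statement) =====
-- stated objective: idiomatic
-- what changed: Replaced the fused manual loop that threads a counter and a growing string with two independent library passes: str.count for the number of zero characters and str.replace to delete them.
import Mathlib
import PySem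

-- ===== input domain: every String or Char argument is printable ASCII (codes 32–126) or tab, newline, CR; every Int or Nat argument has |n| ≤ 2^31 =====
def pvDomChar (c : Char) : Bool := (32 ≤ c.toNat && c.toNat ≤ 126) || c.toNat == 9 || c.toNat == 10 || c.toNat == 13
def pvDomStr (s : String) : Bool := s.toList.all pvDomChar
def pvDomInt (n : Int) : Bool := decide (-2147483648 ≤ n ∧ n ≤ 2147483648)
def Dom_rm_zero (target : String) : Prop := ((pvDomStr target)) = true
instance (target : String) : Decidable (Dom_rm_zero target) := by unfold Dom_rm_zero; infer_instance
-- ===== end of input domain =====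

-- B replaces A's single fused loop (counter + string accumulator) with two independent
-- library passes: target.count('0') and target.replace('0',''). Objective: idiomatic.

-- ===== PORT A =====
-- A's loop over the string's characters, threading (count, new_c); 'new_c += c' is the
-- append on code points, exact for str input.
def rm_zero (target : String) : Int × String :=
  let r := target.toList.foldl
    (fun (s : Int × List Char) c => if c == '0' then (s.1 + 1, s.2) else (s.1, s.2 ++ [c]))
    (0, [])
  (r.1, String.ofList r.2)

-- ===== PORT B =====
def rm_zero_alt (target : String) : Int × String :=
  ((PySem.Str.count target "0" : Int), PySem.Str.replace target "0" "")

-- ===== PRECONDITION & SPEC =====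
def Spec_rm_zero (target : String) (out : Int × String) : Prop := out = rm_zero_alt target
instance (target : String) (out : Int × String) : Decidable (Spec_rm_zero target out) := by unfold Spec_rm_zero; infer_instance

-- ===== CLAIM (what is proved, stated in full; the proofs are below) =====
def Claim_equal_rm_zero : Prop := ∀ (target : String), Dom_rm_zero target → Spec_rm_zero target (rm_zero target)

-- ===== LEMMAS AND PROOFS =====

theorem count_go_singleton (v : Char) (l : List Char) (fuel acc : ℕ)
    (h : l.length ≤ fuel) :
    PySem.Chars.count.go [v] fuel l acc = acc + l.count v := by
  induction l generalizing fuel acc with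
  | nil => cases fuel <;> simp [PySem.Chars.count.go]
  | cons c t ih =>
    cases fuel with
    | zero => simp at h
    | succ f =>
      simp only [List.length_cons, Nat.succ_le_succ_iff] at h
      by_cases hc : c = v
      · subst hc
        simp [PySem.Chars.count.go, List.isPrefixOf, ih f (acc + 1) h]
        omega
      · have : ([v].isPrefixOf (c :: t)) = false := by
          simp [List.isPrefixOf, Ne.symm hc]
        simp [PySem.Chars.count.go, this, ih f acc h, hc]

theorem replace_go_singleton (v : Char) (l : List Char) (fuel : ℕ) (acc : List Char)
    (h : l.length ≤ fuel) :
    PySem.Chars.replace.go [v] [] fuel l acc = acc.reverse ++ l.filter (fun c => c ≠ v) := by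
  induction l generalizing fuel acc with
  | nil => cases fuel <;> simp [PySem.Chars.replace.go]
  | cons c t ih =>
    cases fuel with
    | zero => simp at h
    | succ f =>
      simp only [List.length_cons, Nat.succ_le_succ_iff] at h
      by_cases hc : c = v
      · subst hc
        simp [PySem.Chars.replace.go, List.isPrefixOf, ih f acc h]
      · have hp : ([v].isPrefixOf (c :: t)) = false := by
          simp [List.isPrefixOf, Ne.symm hc]
        simp [PySem.Chars.replace.go, hp, ih f (c :: acc) h, hc]

theorem rm_zero_foldl (l : List Char) (n : Int) (acc : List Char) :
    l.foldl (fun (s : Int × List Char) c => if c == '0' then (s.1 + 1, s.2) else (s.1, s.2 ++ [c])) (n, acc)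
      = (n + (l.count '0' : Int), acc ++ l.filter (fun c => c ≠ '0')) := by
  induction l generalizing n acc with
  | nil => simp
  | cons c t ih =>
    simp only [List.foldl_cons]
    by_cases hc : c = '0'
    · subst hc
      rw [if_pos (by simp), ih]
      simp only [List.count_cons, List.filter_cons, Prod.mk.injEq]
      constructor
      · simp; ring
      · simp
    · rw [if_neg (by simp [hc]), ih]
      simp [hc]

theorem count_singleton (v : Char) (l : List Char) :
    PySem.Chars.count l [v] = l.count v := by
  rw [PySem.Chars.count]
  rw [if_neg (by simp)]
  rw [count_go_singleton v l l.length 0 le_rfl]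
  simp

theorem replace_singleton (v : Char) (l : List Char) :
    PySem.Chars.replace l [v] [] = l.filter (fun c => c ≠ v) := by
  rw [PySem.Chars.replace]
  rw [if_neg (by simp)]
  rw [replace_go_singleton v l l.length [] le_rfl]
  simp

-- ===== VERDICT (by name: the statement is the Claim_ definition above) =====
theorem rm_zero_spec : Claim_equal_rm_zero := by
  intro target _
  unfold Spec_rm_zero rm_zero rm_zero_alt
  rw [rm_zero_foldl]
  refine Prod.ext ?_ ?_
  · show (0 : Int) + (target.toList.count '0' : Int) = (PySem.Str.count target "0" : Int)
    rw [PySem.Str.count_eq]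
    show _ = ((PySem.Chars.count target.toList ['0'] : Nat) : Int)
    rw [count_singleton]
    simp
  · show String.ofList ([] ++ target.toList.filter (fun c => c ≠ '0')) = PySem.Str.replace target "0" ""
    apply String.ext
    rw [PySem.Str.toList_replace]
    show _ = PySem.Chars.replace target.toList ['0'] []
    rw [replace_singleton]
    simp
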